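-- pv_equiv track=rewrite | github.com/ashique6465/DSA | Companies/Infosys/smallest_string.py | smallest_string
-- ===== SOURCE A (Python) =====
-- def smallest_string(s):
--     stack= []
--     for char in s:
--         if stack and stack[-1] == "1" and char =="0":
--             stack.pop()
--         else:
--             stack.append(char)
--
--     return ''.join(stack)
-- ===== SOURCE B (Python) =====
-- def smallest_string(s):
--     items = list(s)
--     while True:
--         out = []
--         i = 0
--         changed = False
--         while i < len(items):
--             if i + 1 < len(items) and items[i] == '1' and items[i + 1] == '0':
--                 i += 2
--                 changed = True
--             else:
--                 out.append(items[i])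
--                 i += 1
--         items = out
--         if not changed:
--             return ''.join(items)
-- ===== Notes on version B (the rewrite author's own statement) =====
-- stated objective: alternative
-- what changed: Replaces the one-pass stack cancellation with repeated left-to-right scan passes that delete adjacent '1','0' pairs until a pass removes nothing (fixpoint of a rewriting system whose normal form is unique).
import Mathlib
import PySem

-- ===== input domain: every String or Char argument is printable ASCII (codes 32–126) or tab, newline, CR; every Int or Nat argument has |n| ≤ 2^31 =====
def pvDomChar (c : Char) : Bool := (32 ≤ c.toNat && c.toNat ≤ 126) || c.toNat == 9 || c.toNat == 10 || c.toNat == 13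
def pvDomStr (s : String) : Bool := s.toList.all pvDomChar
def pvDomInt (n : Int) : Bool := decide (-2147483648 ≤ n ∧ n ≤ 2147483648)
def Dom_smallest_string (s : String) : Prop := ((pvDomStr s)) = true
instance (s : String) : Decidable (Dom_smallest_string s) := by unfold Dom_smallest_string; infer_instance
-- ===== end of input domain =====

-- B replaces A's one-pass stack cancellation with repeated full scan passes that delete
-- adjacent '1','0' pairs until a pass removes nothing (alternative decomposition, not faster).

-- ===== PORT A =====
-- the stack is held top-first: Python's stack[-1] / pop() / append are head? / tail / cons here
def stepA (st : List Char) (c : Char) : List Char :=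
  if st.head? = some '1' ∧ c = '0' then st.tail else c :: st

def smallest_string (s : String) : String :=
  String.ofList ((s.toList.foldl stepA []).reverse)

-- ===== PORT B =====
-- one left-to-right pass of Source B's inner while loop: drop each adjacent '1','0' pair, keep the rest
def pass1 : List Char → List Char
  | [] => []
  | [a] => [a]
  | a :: b :: rest => if a = '1' ∧ b = '0' then pass1 rest else a :: pass1 (b :: rest)

-- needed by loopB's termination proof (a pass never lengthens the list)
theorem pass1_length_le (l : List Char) : (pass1 l).length ≤ l.length := by
  induction l using pass1.induct with
  | case1 => simp [pass1]
  | case2 => simp [pass1]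
  | case3 a b rest h ih => simp only [pass1, if_pos h, List.length_cons]; omega
  | case4 a b rest h ih =>
      have h2 := ih; simp only [List.length_cons] at h2
      simp only [pass1, if_neg h, List.length_cons]; omega

-- Source B's outer while loop: run a pass; if nothing changed (same length), stop
def loopB (items : List Char) : List Char :=
  let out := pass1 items
  if out.length = items.length then out else loopB out
termination_by items.length
decreasing_by exact Nat.lt_of_le_of_ne (pass1_length_le items) (by assumption)

def smallest_string_alt (s : String) : String := String.ofList (loopB s.toList)

-- ===== PRECONDITION & SPEC =====
def Spec_smallest_string (s : String) (out : String) : Prop := out = smallest_string_alt s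
instance (s : String) (out : String) : Decidable (Spec_smallest_string s out) := by unfold Spec_smallest_string; infer_instance

-- ===== CLAIM (what is proved, stated in full; the proofs are below) =====
def Claim_equal_smallest_string : Prop := ∀ (s : String), Dom_smallest_string s → Spec_smallest_string s (smallest_string s)

-- ===== LEMMAS AND PROOFS =====

theorem run_pair (st : List Char) (v : List Char) :
    List.foldl stepA st ('1' :: '0' :: v) = List.foldl stepA st v := by
  simp [List.foldl, stepA]

theorem run_pass1 (l : List Char) : ∀ st : List Char,
    List.foldl stepA st (pass1 l) = List.foldl stepA st l := by
  induction l using pass1.induct with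
  | case1 => intro st; simp [pass1]
  | case2 => intro st; simp [pass1]
  | case3 a b rest h ih =>
      intro st
      simp only [pass1, if_pos h]
      obtain ⟨ha, hb⟩ := h; subst ha; subst hb
      rw [run_pair, ih st]
  | case4 a b rest h ih =>
      intro st
      simp only [pass1, if_neg h, List.foldl_cons]
      exact ih (stepA st a)

theorem pass1_eq_of_length (l : List Char) :
    (pass1 l).length = l.length → pass1 l = l := by
  induction l using pass1.induct with
  | case1 => intro _; rfl
  | case2 => intro _; rfl
  | case3 a b rest h ih =>
      intro hlen
      have h2 := pass1_length_le rest
      simp only [pass1, if_pos h, List.length_cons] at hlen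
      omega
  | case4 a b rest h ih =>
      intro hlen
      simp only [pass1, if_neg h, List.length_cons] at hlen ⊢
      rw [ih (by simp only [List.length_cons]; omega)]

theorem run_of_fix (l : List Char) : ∀ st : List Char, pass1 l = l →
    ¬ (st.head? = some '1' ∧ l.head? = some '0') →
    List.foldl stepA st l = l.reverse ++ st := by
  induction l using pass1.induct with
  | case1 => intro st _ _; simp
  | case2 a =>
      intro st _ hb
      have hstep : stepA st a = a :: st := by
        unfold stepA
        rw [if_neg (fun hc => hb ⟨hc.1, by simp [hc.2]⟩)]
      simp [List.foldl_cons, hstep]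
  | case3 a b rest h ih =>
      intro st hfix _
      exfalso
      have h2 := pass1_length_le rest
      have h3 : (pass1 (a :: b :: rest)).length = (a :: b :: rest).length := by rw [hfix]
      simp only [pass1, if_pos h, List.length_cons] at h3
      omega
  | case4 a b rest h ih =>
      intro st hfix hb
      simp only [pass1, if_neg h, List.cons.injEq] at hfix
      have hstep : stepA st a = a :: st := by
        unfold stepA
        rw [if_neg (fun hc => hb ⟨hc.1, by simp [hc.2]⟩)]
      rw [List.foldl_cons, hstep,
        ih (a :: st) hfix.2 (by
          intro hc
          simp only [List.head?_cons] at hc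
          exact h ⟨Option.some.inj hc.1, Option.some.inj hc.2⟩)]
      simp

theorem loopB_eq (l : List Char) : loopB l = (List.foldl stepA [] l).reverse := by
  induction l using loopB.induct with
  | case1 x out heq =>
      have heq' : (pass1 x).length = x.length := heq
      have hfix : pass1 x = x := pass1_eq_of_length x heq'
      rw [loopB]
      show (if (pass1 x).length = x.length then pass1 x else loopB (pass1 x)) = _
      rw [if_pos heq']
      rw [run_of_fix x [] hfix (by simp)]
      simp [hfix]
  | case2 x out hne ih =>
      have hne' : ¬ (pass1 x).length = x.length := hne
      rw [loopB]
      show (if (pass1 x).length = x.length then pass1 x else loopB (pass1 x)) = _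
      rw [if_neg hne']
      rw [ih, ← run_pass1 x []]

-- ===== VERDICT (by name: the statement is the Claim_ definition above) =====
theorem smallest_string_spec : Claim_equal_smallest_string := by
  intro s _
  unfold Spec_smallest_string smallest_string smallest_string_alt
  rw [loopB_eq]
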